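-- pv_equiv track=rewrite | github.com/cymerrad/aoc | 2019/4.py | is_valid_pt_2
-- ===== SOURCE A (Python) =====
-- from collections import Counter
--
-- def is_valid(num: str):
--     # six digit
--     # within range
--     # some two adjacent digits are the same
--     # nondecreasing
--
--     try:
--         copy = list(num)
--         copy.sort()
--         assert "".join(copy) == num
--
--         for c1,c2 in zip(num[:-1], num[1:]):
--             if c1 == c2:
--                 break
--         else:
--             assert False
--
--     except AssertionError:
--         return False
--     return True
--
-- def is_valid_pt_2(num: str):
--     # valid
--     # some weird rule
--
--     try:
--         assert is_valid(num)
--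
--         counted = Counter(num)
--         for k in counted.values():
--             if k == 2:
--                 break
--         else:
--             assert False
--
--     except AssertionError:
--         return False
--     return True
-- ===== SOURCE B (Python) =====
-- def is_valid_pt_2(num: str):
--     # Single pass: check nondecreasing while tracking run lengths of equal
--     # chars; valid iff nondecreasing and some maximal run has length exactly 2.
--     prev = None
--     run = 0
--     has2 = False
--     for c in num:
--         if prev is not None and c < prev:
--             return False
--         if c == prev:
--             run += 1
--         else:
--             if run == 2:
--                 has2 = True
--             run = 1
--         prev = c
--     if run == 2:
--         has2 = True
--     return has2
-- ===== Notes on version B (the rewrite author's own statement) =====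
-- stated objective: alternative
-- what changed: A sorts the string, compares it with the original, scans zip pairs for an adjacent equal pair and then builds a Counter to look for a value 2; B is one left-to-right scan keeping the previous char and the current equal-run length, rejecting on any decrease and accepting iff some maximal run has length exactly 2.
import Mathlib
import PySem

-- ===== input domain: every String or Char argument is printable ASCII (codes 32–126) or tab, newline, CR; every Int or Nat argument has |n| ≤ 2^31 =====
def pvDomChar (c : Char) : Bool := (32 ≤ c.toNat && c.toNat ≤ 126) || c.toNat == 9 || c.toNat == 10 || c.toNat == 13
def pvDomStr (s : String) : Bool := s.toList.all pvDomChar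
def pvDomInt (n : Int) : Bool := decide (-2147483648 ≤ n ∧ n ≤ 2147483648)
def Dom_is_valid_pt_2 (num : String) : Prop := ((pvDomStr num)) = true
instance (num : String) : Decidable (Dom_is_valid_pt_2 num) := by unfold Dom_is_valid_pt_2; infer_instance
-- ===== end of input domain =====

-- B replaces A's sort + Counter passes by one left-to-right scan tracking the previous char
-- and the current equal-run length (objective: alternative single-pass decomposition).

-- ===== PORT A =====
-- the `for c1,c2 in zip(num[:-1], num[1:]): if c1 == c2: break / else: assert False` loop
def pvPairLoop : List (Char × Char) → Bool
  | [] => false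
  | (c1, c2) :: rest => if c1 == c2 then true else pvPairLoop rest

def is_valid (num : String) : Bool :=
  let copy := PySem.List.sorted num.toList (fun c => c) false
  if copy = num.toList then
    pvPairLoop ((PySem.List.slice num.toList none (some (-1))).zip
                (PySem.List.slice num.toList (some 1) none))
  else false

-- the `for k in counted.values(): if k == 2: break / else: assert False` loop
def pvValuesLoop : List Int → Bool
  | [] => false
  | k :: rest => if k == 2 then true else pvValuesLoop rest

def is_valid_pt_2 (num : String) : Bool :=
  if is_valid num then pvValuesLoop (PySem.Dict.counter num.toList).values
  else false

-- ===== PORT B =====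
-- B's scan: prev = previous char (None before the first), run = current equal-run length,
-- has2 = a finished run had length exactly 2; early `return False` on a decreasing pair.
def pvScan : List Char → Option Char → Nat → Bool → Bool
  | [], _, run, has2 => has2 || run == 2
  | c :: rest, prev, run, has2 =>
    match prev with
    | none => pvScan rest (some c) 1 (has2 || run == 2)
    | some p =>
      if c < p then false
      else if c == p then pvScan rest (some c) (run + 1) has2
      else pvScan rest (some c) 1 (has2 || run == 2)

def is_valid_pt_2_alt (num : String) : Bool :=
  pvScan num.toList none 0 false

-- ===== PRECONDITION & SPEC =====
def Spec_is_valid_pt_2 (num : String) (out : Bool) : Prop := out = is_valid_pt_2_alt num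
instance (num : String) (out : Bool) : Decidable (Spec_is_valid_pt_2 num out) := by unfold Spec_is_valid_pt_2; infer_instance

-- ===== CLAIM (what is proved, stated in full; the proofs are below) =====
def Claim_equal_is_valid_pt_2 : Prop := ∀ (num : String), Dom_is_valid_pt_2 num → Spec_is_valid_pt_2 num (is_valid_pt_2 num)

-- ===== LEMMAS AND PROOFS =====

-- common canonical form: nondecreasing, and some digit occurs exactly twice
def pvAnyC2 (l : List Char) : Bool := l.any (fun d => l.count d == 2)

-- semantic run tracker: what B's scan computes once monotonicity is granted
def pvRunSem : List Char → Char → Nat → Bool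
  | [], _, run => run == 2
  | c :: rest, p, run =>
    if c == p then pvRunSem rest p (run + 1) else (run == 2) || pvRunSem rest c 1

-- adjacency checker in structural form (what A's zip loop computes)
def pvAdjB : List Char → Bool
  | a :: b :: t => if a == b then true else pvAdjB (b :: t)
  | _ => false

theorem pvPairLoop_zip_eq (l : List Char) :
    pvPairLoop (l.dropLast.zip l.tail) = pvAdjB l := by
  induction l with
  | nil => rfl
  | cons a t ih =>
    cases t with
    | nil => rfl
    | cons b t' =>
      show pvPairLoop ((a :: (b :: t').dropLast).zip (b :: t')) = _
      have : (a :: (b :: t').dropLast).zip (b :: t')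
          = (a, b) :: ((b :: t').dropLast.zip t') := by
        simp [List.zip]
      rw [this]
      show (if a == b then true else pvPairLoop ((b :: t').dropLast.zip (b :: t').tail)) = _
      rw [ih]
      rfl

theorem pvValuesLoop_eq_any (vs : List Int) :
    pvValuesLoop vs = vs.any (fun k => k == 2) := by
  induction vs with
  | nil => rfl
  | cons k rest ih =>
    show (if k == 2 then true else pvValuesLoop rest) = _
    rw [ih]; by_cases h : k = 2 <;> simp [h]

theorem pvCounterValues_any (l : List Char) :
    pvValuesLoop (PySem.Dict.counter l).values = pvAnyC2 l := by
  rw [pvValuesLoop_eq_any,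
      PySem.Dict.values_eq_map_keys _ (PySem.Dict.nodup_keys_counter l) 0,
      PySem.Dict.keys_counter]
  unfold pvAnyC2
  rw [Bool.eq_iff_iff]
  simp only [List.any_map, List.any_eq_true, Function.comp,
    PySem.Dict.getD_counter, beq_iff_eq]
  constructor
  · rintro ⟨x, hx, he⟩
    exact ⟨x, (PySem.Set.mem_ofList l x).1 hx, by exact_mod_cast he⟩
  · rintro ⟨x, hx, he⟩
    exact ⟨x, (PySem.Set.mem_ofList l x).2 hx, by exact_mod_cast he⟩

-- sorted(num) == num means Pairwise (· ≤ ·)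
theorem pvSortedFix (l : List Char) :
    PySem.List.sorted l (fun c => c) false = l ↔ l.Pairwise (· ≤ ·) := by
  constructor
  · intro h
    have := PySem.List.sorted_pairwise l (fun c => c)
    rw [h] at this
    exact this
  · intro h
    exact PySem.List.sorted_eq_self_of_pairwise l (fun c => c) h

-- a nondecreasing list with no adjacent equal pair has no duplicates
theorem pvNodup_of_noAdj : ∀ (l : List Char), l.Pairwise (· ≤ ·) → pvAdjB l = false → l.Nodup := by
  intro l
  induction l with
  | nil => intro _ _; exact List.nodup_nil
  | cons a t ih =>
    intro hp hadj
    cases t with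
    | nil => simp
    | cons b t' =>
      have hab : ¬ (a == b) = true := by
        intro h
        unfold pvAdjB at hadj
        rw [if_pos h] at hadj
        exact Bool.noConfusion hadj
      have hadj' : pvAdjB (b :: t') = false := by
        unfold pvAdjB at hadj
        rwa [if_neg hab] at hadj
      have hp' : (b :: t').Pairwise (· ≤ ·) := (List.pairwise_cons.mp hp).2
      have hnd := ih hp' hadj'
      refine List.nodup_cons.mpr ⟨?_, hnd⟩
      have hab' : a ≠ b := by simpa using hab
      have haleb : a ≤ b := (List.pairwise_cons.mp hp).1 b (by simp)
      have haltb : a < b := lt_of_le_of_ne haleb hab'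
      intro hmem
      rcases List.mem_cons.mp hmem with h | h
      · exact hab' h
      · have : b ≤ a := (List.pairwise_cons.mp hp').1 a h
        exact absurd (lt_of_lt_of_le haltb this) (lt_irrefl a)

theorem pvAnyC2_false_of_nodup (l : List Char) (h : l.Nodup) : pvAnyC2 l = false := by
  unfold pvAnyC2
  rw [List.any_eq_false]
  intro d _
  have := List.nodup_iff_count_le_one.mp h d
  simp only [beq_iff_eq]
  omega

-- Pairwise over a cons-cons splits into the head pair and the tail (transitivity)
theorem pvPairwise_cons_cons (p c : Char) (rest : List Char) :
    (p :: c :: rest).Pairwise (· ≤ ·) ↔ p ≤ c ∧ (c :: rest).Pairwise (· ≤ ·) := by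
  constructor
  · intro h
    exact ⟨(List.pairwise_cons.mp h).1 c (by simp), (List.pairwise_cons.mp h).2⟩
  · rintro ⟨hpc, h⟩
    refine List.pairwise_cons.mpr ⟨?_, h⟩
    intro x hx
    rcases List.mem_cons.mp hx with rfl | hx
    · exact hpc
    · exact le_trans hpc ((List.pairwise_cons.mp h).1 x hx)

-- any-count-2 over a block of p's followed by a p-free tail
theorem pvAnyC2_rep_app (p : Char) (t : List Char) (run : Nat) (h1 : 1 ≤ run)
    (hp : p ∉ t) : pvAnyC2 (List.replicate run p ++ t) = ((run == 2) || pvAnyC2 t) := by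
  unfold pvAnyC2
  have hcp : (List.replicate run p ++ t).count p = run := by
    rw [List.count_append, List.count_replicate, if_pos (by simp),
        List.count_eq_zero_of_not_mem hp]
    omega
  have hct : ∀ d ∈ t, (List.replicate run p ++ t).count d = t.count d := by
    intro d hd
    have hdp : (p == d) = false := by
      simp only [beq_eq_false_iff_ne]
      intro h; exact hp (h ▸ hd)
    rw [List.count_append, List.count_replicate, if_neg (by simp [hdp]), Nat.zero_add]
  rw [Bool.eq_iff_iff]
  simp only [List.any_eq_true, Bool.or_eq_true, beq_iff_eq]
  constructor
  · rintro ⟨d, hd, he⟩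
    rcases List.mem_append.mp hd with hd | hd
    · left
      have : d = p := List.eq_of_mem_replicate hd
      subst this
      rw [hcp] at he
      exact he
    · right
      exact ⟨d, hd, by rw [hct d hd] at he; exact he⟩
  · rintro h
    rcases h with h | ⟨d, hd, he⟩
    · refine ⟨p, ?_, by rw [hcp]; exact h⟩
      exact List.mem_append.mpr (Or.inl (by
        cases run with
        | zero => omega
        | succ n => simp [List.replicate_succ]))
    · exact ⟨d, List.mem_append.mpr (Or.inr hd), by rw [hct d hd]; exact he⟩

-- the heart: on a nondecreasing suffix the run tracker detects a count-exactly-2 digit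
theorem pvRunSem_eq : ∀ (l : List Char) (p : Char) (run : Nat), 1 ≤ run →
    (p :: l).Pairwise (· ≤ ·) →
    pvRunSem l p run = pvAnyC2 (List.replicate run p ++ l) := by
  intro l
  induction l with
  | nil =>
    intro p run h1 _
    show (run == 2) = pvAnyC2 (List.replicate run p ++ [])
    rw [pvAnyC2_rep_app p [] run h1 (by simp)]
    simp [pvAnyC2]
  | cons c rest ih =>
    intro p run h1 hp
    by_cases hc : c = p
    · subst hc
      show (if c == c then pvRunSem rest c (run + 1) else _) = _
      rw [if_pos (by simp)]
      have hp' : (c :: rest).Pairwise (· ≤ ·) := (List.pairwise_cons.mp hp).2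
      rw [ih c (run + 1) (by omega) hp']
      have hl : List.replicate (run + 1) c ++ rest = List.replicate run c ++ c :: rest := by
        rw [List.replicate_succ' (n := run)]
        simp
      rw [hl]
    · have hne : (c == p) = false := by simpa using hc
      show (if c == p then _ else (run == 2) || pvRunSem rest c 1) = _
      rw [if_neg (by simp [hne])]
      have hsplit := (pvPairwise_cons_cons p c rest).mp hp
      have hp' : (c :: rest).Pairwise (· ≤ ·) := hsplit.2
      have hltpc : p < c := lt_of_le_of_ne hsplit.1 (fun h => hc h.symm)
      have hpnotin : p ∉ c :: rest := by
        intro hmem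
        rcases List.mem_cons.mp hmem with h | h
        · exact hc h.symm
        · have : c ≤ p := (List.pairwise_cons.mp hp').1 p h
          exact absurd (lt_of_lt_of_le hltpc this) (lt_irrefl p)
      rw [ih c 1 le_rfl hp']
      rw [pvAnyC2_rep_app p (c :: rest) run h1 hpnotin]
      have hone : List.replicate 1 c ++ rest = c :: rest := by simp
      rw [hone]

-- B's scan = monotone check && run tracker
theorem pvScan_eq : ∀ (l : List Char) (p : Char) (run : Nat) (has2 : Bool),
    pvScan l (some p) run has2
      = (decide ((p :: l).Pairwise (· ≤ ·)) && (has2 || pvRunSem l p run)) := by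
  intro l
  induction l with
  | nil =>
    intro p run has2
    simp [pvScan, pvRunSem]
  | cons c rest ih =>
    intro p run has2
    have hsplit : decide ((p :: c :: rest).Pairwise (· ≤ ·))
        = (decide (p ≤ c) && decide ((c :: rest).Pairwise (· ≤ ·))) := by
      rw [Bool.eq_iff_iff]
      simp only [Bool.and_eq_true, decide_eq_true_eq]
      exact pvPairwise_cons_cons p c rest
    show (if c < p then false
          else if c == p then pvScan rest (some c) (run + 1) has2
          else pvScan rest (some c) 1 (has2 || run == 2)) = _
    by_cases hlt : c < p
    · rw [if_pos hlt, hsplit]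
      have : decide (p ≤ c) = false := by simp [not_le.mpr hlt]
      rw [this]
      simp
    · rw [if_neg hlt, hsplit]
      have hple : decide (p ≤ c) = true := by simp [le_of_not_gt hlt]
      rw [hple, Bool.true_and]
      by_cases hc : c = p
      · subst hc
        rw [if_pos (by simp), ih]
        show _ = (_ && (has2 || pvRunSem (c :: rest) c run))
        have : pvRunSem (c :: rest) c run = pvRunSem rest c (run + 1) := by
          show (if c == c then _ else _) = _
          rw [if_pos (by simp)]
        rw [this]
      · have hne : (c == p) = false := by simpa using hc
        rw [if_neg (by simp [hne]), ih]
        have : pvRunSem (c :: rest) p run = ((run == 2) || pvRunSem rest c 1) := by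
          show (if c == p then _ else _) = _
          rw [if_neg (by simp [hne])]
        rw [this, Bool.or_assoc]

-- both ports equal the canonical form
theorem pvA_canon (num : String) :
    is_valid_pt_2 num
      = (decide (num.toList.Pairwise (· ≤ ·)) && pvAnyC2 num.toList) := by
  unfold is_valid_pt_2 is_valid
  by_cases hs : PySem.List.sorted num.toList (fun c => c) false = num.toList
  · have hpw : num.toList.Pairwise (· ≤ ·) := (pvSortedFix num.toList).mp hs
    rw [if_pos hs, decide_eq_true hpw, Bool.true_and]
    rw [PySem.List.slice_to_neg_one, PySem.List.slice_from_one, pvPairLoop_zip_eq]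
    by_cases ha : pvAdjB num.toList = true
    · rw [if_pos ha, pvCounterValues_any]
    · have ha' : pvAdjB num.toList = false := by
        cases h : pvAdjB num.toList
        · rfl
        · exact absurd h ha
      rw [ha', if_neg (by simp)]
      exact (pvAnyC2_false_of_nodup _ (pvNodup_of_noAdj _ hpw ha')).symm
  · have hpw : ¬ num.toList.Pairwise (· ≤ ·) := fun h => hs ((pvSortedFix num.toList).mpr h)
    rw [if_neg hs, decide_eq_false hpw, Bool.false_and]
    rfl

theorem pvB_canon (num : String) :
    is_valid_pt_2_alt num
      = (decide (num.toList.Pairwise (· ≤ ·)) && pvAnyC2 num.toList) := by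
  unfold is_valid_pt_2_alt
  cases h : num.toList with
  | nil => simp [pvScan, pvAnyC2]
  | cons c rest =>
    show pvScan rest (some c) 1 (false || (0 == 2)) = _
    rw [show (false || ((0 : Nat) == 2)) = false from rfl, pvScan_eq]
    by_cases hpw : (c :: rest).Pairwise (· ≤ ·)
    · rw [pvRunSem_eq rest c 1 le_rfl hpw]
      simp
    · rw [decide_eq_false hpw]
      simp

-- ===== VERDICT (by name: the statement is the Claim_ definition above) =====
theorem is_valid_pt_2_spec : Claim_equal_is_valid_pt_2 := by
  intro num _
  show is_valid_pt_2 num = is_valid_pt_2_alt num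
  rw [pvA_canon, pvB_canon]
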